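-- pv_equiv track=rewrite | github.com/kelleyloder/tidyHTML | tidyHTML.py | add_blank_lines
-- ===== SOURCE A (Python) =====
-- def add_blank_lines(content):
--     '''adds needed blank lines'''
--     line = 0
--     start_tag_list = ['<head>', '<body>', '<h1>', '<h2>', '<h3>', '<h4>', '<h5>', '<h6>']
--     while line < len(content):
--         for name in start_tag_list:
--             if name in content[line]:
--                 content.insert(line, '\n')
--                 line += 1
--         line += 1
--     return content
-- ===== SOURCE B (Python) =====
-- def add_blank_lines(content):
--     '''adds needed blank lines (single forward pass; mutates content in place like A)'''
--     start_tag_list = ['<head>', '<body>', '<h1>', '<h2>', '<h3>', '<h4>', '<h5>', '<h6>']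
--     result = []
--     for line in content:
--         count = sum(1 for name in start_tag_list if name in line)
--         result.extend(['\n'] * count)
--         result.append(line)
--     content[:] = result
--     return content
-- ===== Notes on version B (the rewrite author's own statement) =====
-- stated objective: simpler
-- what changed: Replaces A's while-loop with in-place insert() calls and index bookkeeping by a single forward pass that builds the result list (count matching tags, emit that many blank lines, then the line) and writes it back with content[:] = result.
import Mathlib
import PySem

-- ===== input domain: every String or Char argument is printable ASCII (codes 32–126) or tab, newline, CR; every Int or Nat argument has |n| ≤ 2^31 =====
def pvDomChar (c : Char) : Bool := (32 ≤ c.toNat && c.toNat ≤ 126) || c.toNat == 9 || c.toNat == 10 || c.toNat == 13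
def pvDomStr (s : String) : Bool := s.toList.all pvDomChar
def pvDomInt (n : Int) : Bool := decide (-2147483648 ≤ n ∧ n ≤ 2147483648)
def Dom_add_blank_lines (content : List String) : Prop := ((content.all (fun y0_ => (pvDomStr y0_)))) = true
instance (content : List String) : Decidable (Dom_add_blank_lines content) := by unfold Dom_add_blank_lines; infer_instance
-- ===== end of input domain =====

-- B builds the result in one forward pass (count tags, emit blanks, append the line) instead of
-- A's while-loop with in-place insert() and index bookkeeping; both mutate the argument in Python,
-- and the equivalence proved here is about the returned list of lines.

-- ===== PORT A =====
-- the start_tag_list literal (shared data between both ports)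
def pvStartTagList : List String :=
  ["<head>", "<body>", "<h1>", "<h2>", "<h3>", "<h4>", "<h5>", "<h6>"]

-- one step of A's inner 'for name in start_tag_list' loop; state = (content, line)
def pvTagStep (st : List String × Nat) (name : String) : List String × Nat :=
  -- 'name in content[line]'; line < len(content) always holds here, so getD is exact
  if PySem.Str.isIn name (st.1.getD st.2 "") then
    (PySem.List.insert st.1 (st.2 : Int) "\n", st.2 + 1)
  else st

-- invariant used only for termination of the while loop
theorem pvTagStep_measure (ns : List String) (c : List String) (i : Nat) :
    (ns.foldl pvTagStep (c, i)).1.length - (ns.foldl pvTagStep (c, i)).2 = c.length - i := by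
  induction ns generalizing c i with
  | nil => rfl
  | cons n ns ih =>
    simp only [List.foldl_cons, pvTagStep]
    split
    · rw [ih]; simp [PySem.List.length_insert]
    · exact ih c i

-- A's 'while line < len(content)' loop
def pvALoop (c : List String) (i : Nat) : List String :=
  if h : i < c.length then
    let st := pvStartTagList.foldl pvTagStep (c, i)
    pvALoop st.1 (st.2 + 1)
  else c
termination_by c.length - i
decreasing_by
  have := pvTagStep_measure pvStartTagList c i
  omega

def add_blank_lines (content : List String) : List String :=
  pvALoop content 0

-- ===== PORT B =====
def add_blank_lines_alt (content : List String) : List String :=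
  content.foldl (fun result line =>
    let count := pvStartTagList.foldl
      (fun k name => if PySem.Str.isIn name line then k + 1 else k) 0
    (result ++ List.replicate count "\n") ++ [line]) []

-- ===== PRECONDITION & SPEC =====
def Spec_add_blank_lines (content : List String) (out : List String) : Prop := out = add_blank_lines_alt content
instance (content : List String) (out : List String) : Decidable (Spec_add_blank_lines content out) := by unfold Spec_add_blank_lines; infer_instance

-- ===== CLAIM (what is proved, stated in full; the proofs are below) =====
def Claim_equal_add_blank_lines : Prop := ∀ (content : List String), Dom_add_blank_lines content → Spec_add_blank_lines content (add_blank_lines content)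

-- ===== LEMMAS AND PROOFS =====

-- B's per-line tag counter as countP
theorem pvCount_eq (ns : List String) (l : String) (a : Nat) :
    ns.foldl (fun k name => if PySem.Str.isIn name l then k + 1 else k) a
      = a + ns.countP (fun n => PySem.Str.isIn n l) := by
  induction ns generalizing a with
  | nil => simp
  | cons n ns ih =>
    rw [List.foldl_cons, ih, List.countP_cons]
    by_cases h : PySem.Str.isIn n l
    · have h' : PySem.Chars.isIn n.toList l.toList = true := by simpa using h
      simp [h']
      omega
    · have h' : PySem.Chars.isIn n.toList l.toList = false := by simpa using h
      simp [h']

-- the inner for-loop of A, processing the line at index pre.length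
theorem pvFoldl_tagStep (ns : List String) (pre rest : List String) (l : String) :
    ns.foldl pvTagStep (pre ++ l :: rest, pre.length)
      = (pre ++ List.replicate (ns.countP (fun n => PySem.Str.isIn n l)) "\n" ++ l :: rest,
         pre.length + ns.countP (fun n => PySem.Str.isIn n l)) := by
  induction ns generalizing pre with
  | nil => simp
  | cons n ns ih =>
    have hget : (pre ++ l :: rest).getD pre.length "" = l := by
      simp [List.getD_eq_getElem?_getD]
    rw [List.foldl_cons]
    by_cases h : PySem.Str.isIn n l
    · have hstep : pvTagStep (pre ++ l :: rest, pre.length) n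
          = ((pre ++ ["\n"]) ++ l :: rest, (pre ++ ["\n"]).length) := by
        simp only [pvTagStep, hget, h, if_true]
        rw [PySem.List.insert_natCast _ _ _ (by simp)]
        simp
      have h' : PySem.Chars.isIn n.toList l.toList = true := by simpa using h
      rw [hstep, ih, List.countP_cons]
      simp [h', List.replicate_succ]
      omega
    · have hstep : pvTagStep (pre ++ l :: rest, pre.length) n = (pre ++ l :: rest, pre.length) := by
        simp only [pvTagStep, hget]
        rw [if_neg h]
      have h' : PySem.Chars.isIn n.toList l.toList = false := by simpa using h
      rw [hstep, ih, List.countP_cons]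
      simp [h']

-- A's while loop = B's fold, with the processed prefix generalized
theorem pvLoop_eq_fold (rest pre : List String) :
    pvALoop (pre ++ rest) pre.length
      = rest.foldl (fun result line =>
          let count := pvStartTagList.foldl
            (fun k name => if PySem.Str.isIn name line then k + 1 else k) 0
          (result ++ List.replicate count "\n") ++ [line]) pre := by
  induction rest generalizing pre with
  | nil => rw [pvALoop]; simp
  | cons l rest ih =>
    rw [pvALoop]
    have hlt : pre.length < (pre ++ l :: rest).length := by simp
    rw [dif_pos hlt]
    simp only [pvFoldl_tagStep]
    have hk : pvStartTagList.foldl (fun k name => if PySem.Str.isIn name l then k + 1 else k) 0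
        = pvStartTagList.countP (fun n => PySem.Str.isIn n l) := by
      rw [pvCount_eq]; omega
    have harr : pre ++ List.replicate (pvStartTagList.countP (fun n => PySem.Str.isIn n l)) "\n" ++ l :: rest
        = ((pre ++ List.replicate (pvStartTagList.countP (fun n => PySem.Str.isIn n l)) "\n") ++ [l]) ++ rest := by
      simp
    have hlen : pre.length + pvStartTagList.countP (fun n => PySem.Str.isIn n l) + 1
        = ((pre ++ List.replicate (pvStartTagList.countP (fun n => PySem.Str.isIn n l)) "\n") ++ [l]).length := by
      simp
      omega
    rw [harr, hlen, ih]
    have hk' : List.countP (fun n => PySem.Chars.isIn n.toList l.toList) pvStartTagList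
        = List.foldl (fun k name => if PySem.Chars.isIn name.toList l.toList then k + 1 else k) 0 pvStartTagList := by
      simpa using hk.symm
    simp [hk']
    rfl

-- ===== VERDICT (by name: the statement is the Claim_ definition above) =====
theorem add_blank_lines_spec : Claim_equal_add_blank_lines := by
  intro content _
  show add_blank_lines content = add_blank_lines_alt content
  have := pvLoop_eq_fold content []
  simpa [add_blank_lines, add_blank_lines_alt] using this
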